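-- pv_equiv track=rewrite | github.com/retardedjames/redbot-cogs | artguesser/add_artists.py | py_str
-- ===== SOURCE A (Python) =====
-- def py_str(s):
--     """Return a Python repr of a string, using double quotes."""
--     if not s:
--         s = ''
--     s = s.strip()
--     # Manually escape for a double-quoted Python string
--     result = ''
--     for ch in s:
--         if ch == '\\':
--             result += '\\\\'
--         elif ch == '"':
--             result += '\\"'
--         elif ch == '\n':
--             result += '\\n'
--         elif ch == '\r':
--             result += '\\r'
--         else:
--             result += ch
--     return '"' + result + '"'
-- ===== SOURCE B (Python) =====
-- def py_str(s):
--     """Return a Python repr of a string, using double quotes."""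
--     if not s:
--         s = ''
--     s = s.strip()
--     result = (s.replace('\\', '\\\\')
--                .replace('"', '\\"')
--                .replace('\n', '\\n')
--                .replace('\r', '\\r'))
--     return '"' + result + '"'
-- ===== Notes on version B (the rewrite author's own statement) =====
-- stated objective: idiomatic
-- what changed: Replaces the per-character dispatch loop with string accumulation by a chain of four whole-string str.replace passes (backslash first), the idiomatic way to escape for a double-quoted literal.
import Mathlib
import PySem

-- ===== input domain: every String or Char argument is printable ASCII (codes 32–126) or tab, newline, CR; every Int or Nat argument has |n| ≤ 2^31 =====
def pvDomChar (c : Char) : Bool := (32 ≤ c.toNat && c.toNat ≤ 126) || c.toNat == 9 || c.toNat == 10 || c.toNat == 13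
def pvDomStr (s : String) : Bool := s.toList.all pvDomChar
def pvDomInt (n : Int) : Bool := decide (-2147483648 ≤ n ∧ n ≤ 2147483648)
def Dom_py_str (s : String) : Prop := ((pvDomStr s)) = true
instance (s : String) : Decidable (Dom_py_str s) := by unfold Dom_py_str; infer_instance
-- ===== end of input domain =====

-- B replaces A's per-character dispatch loop by a chain of whole-string replace passes
-- (backslash escaped first); idiomatic decomposition, same cost.

-- ===== PORT A =====
-- literal transliteration: `if not s: s = ''`, strip, char loop with string accumulator
def py_str (s : String) : String :=
  let s1 := if s = "" then "" else s
  let s2 := PySem.Str.strip s1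
  let result := s2.toList.foldl (fun r ch =>
    if ch = '\\' then r ++ "\\\\"
    else if ch = '"' then r ++ "\\\""
    else if ch = '\n' then r ++ "\\n"
    else if ch = '\r' then r ++ "\\r"
    else r.push ch) ""
  "\"" ++ result ++ "\""

-- ===== PORT B =====
-- literal transliteration of Source B: strip, then four chained str.replace passes
def py_str_alt (s : String) : String :=
  let s1 := if s = "" then "" else s
  let s2 := PySem.Str.strip s1
  let result :=
    PySem.Str.replace
      (PySem.Str.replace
        (PySem.Str.replace
          (PySem.Str.replace s2 "\\" "\\\\")
          "\"" "\\\"")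
        "\n" "\\n")
      "\r" "\\r"
  "\"" ++ result ++ "\""

-- ===== PRECONDITION & SPEC =====
def Spec_py_str (s : String) (out : String) : Prop := out = py_str_alt s
instance (s : String) (out : String) : Decidable (Spec_py_str s out) := by unfold Spec_py_str; infer_instance

-- ===== CLAIM (what is proved, stated in full; the proofs are below) =====
def Claim_equal_py_str : Prop := ∀ (s : String), Dom_py_str s → Spec_py_str s (py_str s)

-- ===== LEMMAS AND PROOFS =====

-- substituting a single character: what one replace pass does, char by char
def pvSub (c : Char) (r : List Char) (ch : Char) : List Char :=
  if ch = c then r else [ch]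

-- the escape of one character, as A's branches produce it
def pvEsc (ch : Char) : List Char :=
  if ch = '\\' then ['\\', '\\']
  else if ch = '"' then ['\\', '"']
  else if ch = '\n' then ['\\', 'n']
  else if ch = '\r' then ['\\', 'r']
  else [ch]

theorem go_single (c : Char) (r : List Char) :
    ∀ (l : List Char) (fuel : Nat) (acc : List Char), l.length ≤ fuel →
      PySem.Chars.replace.go [c] r fuel l acc = acc.reverse ++ l.flatMap (pvSub c r) := by
  intro l
  induction l with
  | nil =>
      intro fuel acc _
      cases fuel <;> simp [PySem.Chars.replace.go.eq_def]
  | cons hd tl ih =>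
      intro fuel acc hle
      cases fuel with
      | zero => simp at hle
      | succ n =>
          rw [PySem.Chars.replace.go.eq_def]
          by_cases h : hd = c
          · subst h
            have hp : List.isPrefixOf [hd] (hd :: tl) = true := by
              simp [List.isPrefixOf]
            simp only [hp, if_true, List.length_cons, List.length_nil, Nat.zero_add, List.drop_succ_cons, List.drop_zero]
            rw [ih n (r.reverse ++ acc) (by simpa using Nat.le_of_succ_le_succ hle)]
            simp [pvSub]
          · have hp : List.isPrefixOf [c] (hd :: tl) = false := by
              simp only [List.isPrefixOf, Bool.and_true]
              exact decide_eq_false (fun hc => h hc.symm)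
            simp only [hp, Bool.false_eq_true, if_false]
            rw [ih n (hd :: acc) (Nat.le_of_succ_le_succ hle)]
            simp [pvSub, h]

theorem replace_single (l : List Char) (c : Char) (r : List Char) :
    PySem.Chars.replace l [c] r = l.flatMap (pvSub c r) := by
  unfold PySem.Chars.replace
  simp only [List.isEmpty_cons, Bool.false_eq_true, if_false]
  exact go_single c r l l.length [] (le_refl _)

theorem foldA (l : List Char) (acc : String) :
    (l.foldl (fun r ch =>
      if ch = '\\' then r ++ "\\\\"
      else if ch = '"' then r ++ "\\\""
      else if ch = '\n' then r ++ "\\n"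
      else if ch = '\r' then r ++ "\\r"
      else r.push ch) acc).toList = acc.toList ++ l.flatMap pvEsc := by
  induction l generalizing acc with
  | nil => simp
  | cons hd tl ih =>
      simp only [List.foldl_cons, List.flatMap_cons]
      rw [ih]
      unfold pvEsc
      split_ifs <;> simp_all [String.toList_append, String.toList_push]

-- the four composed substitution passes act on each character exactly as pvEsc
theorem chain_char (ch : Char) :
    ((((pvSub '\\' ['\\', '\\'] ch).flatMap (pvSub '"' ['\\', '"'])).flatMap
        (pvSub '\n' ['\\', 'n'])).flatMap (pvSub '\r' ['\\', 'r'])) = pvEsc ch := by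
  unfold pvSub pvEsc
  by_cases h1 : ch = '\\'
  · subst h1; decide
  by_cases h2 : ch = '"'
  · subst h2; decide
  by_cases h3 : ch = '\n'
  · subst h3; decide
  by_cases h4 : ch = '\r'
  · subst h4; decide
  simp [h1, h2, h3, h4]

theorem body_eq (t : String) :
    (t.toList.foldl (fun r ch =>
      if ch = '\\' then r ++ "\\\\"
      else if ch = '"' then r ++ "\\\""
      else if ch = '\n' then r ++ "\\n"
      else if ch = '\r' then r ++ "\\r"
      else r.push ch) "").toList =
    (PySem.Str.replace
      (PySem.Str.replace
        (PySem.Str.replace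
          (PySem.Str.replace t "\\" "\\\\")
          "\"" "\\\"")
        "\n" "\\n")
      "\r" "\\r").toList := by
  rw [foldA]
  simp only [PySem.Str.toList_replace]
  rw [show ("\\" : String).toList = ['\\'] by rfl,
      show ("\"" : String).toList = ['"'] by rfl,
      show ("\n" : String).toList = ['\n'] by rfl,
      show ("\r" : String).toList = ['\r'] by rfl,
      show ("\\\\" : String).toList = ['\\', '\\'] by rfl,
      show ("\\\"" : String).toList = ['\\', '"'] by rfl,
      show ("\\n" : String).toList = ['\\', 'n'] by rfl,
      show ("\\r" : String).toList = ['\\', 'r'] by rfl]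
  rw [replace_single, replace_single, replace_single, replace_single]
  simp only [String.toList_empty, List.nil_append, List.flatMap_assoc]
  refine (List.flatMap_congr fun ch _ => ?_).symm
  simpa only [List.flatMap_assoc] using chain_char ch

-- ===== VERDICT (by name: the statement is the Claim_ definition above) =====
theorem py_str_spec : Claim_equal_py_str := by
  intro s _
  unfold Spec_py_str py_str py_str_alt
  rw [← String.toList_inj]
  simp only [String.toList_append, body_eq]
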